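-- pv_equiv track=rewrite | github.com/danimcgu98/python | cryptoverter/aes_funcs.py | create_matrix_from_ascii
-- ===== SOURCE A (Python) =====
-- def create_matrix_from_ascii(value):
--
--     matrix = [[],[],[],[]]
--
--     for i, char in enumerate(value):
--         index = i
--         if index + 1 >= 4:
--             index %= 4
--         matrix[index].append(hex(ord(char)))
--
--     return matrix
-- ===== SOURCE B (Python) =====
-- def create_matrix_from_ascii(value):
--     heads = [value[k:k+4] for k in range(0, len(value), 4)]
--     return [[hex(ord(h[j])) for h in heads if j < len(h)] for j in range(4)]
-- ===== Notes on version B (the rewrite author's own statement) =====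
-- stated objective: alternative
-- what changed: splits the input into 4-character chunks once and builds each of the four rows independently by scanning the chunk list, instead of distributing characters one-by-one into matrix[i%4]
import Mathlib
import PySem

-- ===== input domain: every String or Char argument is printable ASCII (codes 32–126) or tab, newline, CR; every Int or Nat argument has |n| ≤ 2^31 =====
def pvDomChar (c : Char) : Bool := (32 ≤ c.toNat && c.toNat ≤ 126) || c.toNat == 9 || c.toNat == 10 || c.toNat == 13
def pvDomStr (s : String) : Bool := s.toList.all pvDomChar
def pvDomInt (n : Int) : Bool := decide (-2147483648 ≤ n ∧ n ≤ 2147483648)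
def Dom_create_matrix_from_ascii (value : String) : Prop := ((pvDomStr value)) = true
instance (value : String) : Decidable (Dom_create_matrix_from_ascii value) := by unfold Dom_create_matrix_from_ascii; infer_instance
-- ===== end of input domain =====

-- B splits the input into 4-character chunks once and builds each of the four rows
-- independently from the chunk list, instead of A's one-by-one distribution into
-- matrix[i%4] (objective: alternative decomposition, same cost).

-- shared helper: Python's hex(n) for n ≥ 0 ("0x" + lowercase hex digits); both Pythons call the built-in hex
def hexDigit (n : Nat) : Char := if n < 10 then Char.ofNat (48 + n) else Char.ofNat (87 + n)

def hexCore (n : Nat) (acc : List Char) : List Char :=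
  if h : n < 16 then hexDigit n :: acc
  else hexCore (n / 16) (hexDigit (n % 16) :: acc)
termination_by n
decreasing_by exact Nat.div_lt_self (by omega) (by omega)

def hexStr (n : Nat) : String := String.ofList ('0' :: 'x' :: hexCore n [])

-- ===== PORT A =====
def aStep (matrix : List (List String)) (p : Int × Char) : List (List String) :=
  let index := p.1
  let index := if index + 1 ≥ 4 then PySem.Int.mod index 4 else index
  PySem.List.pySetD matrix index (PySem.List.pyGetD matrix index [] ++ [hexStr p.2.toNat])

def create_matrix_from_ascii (value : String) : List (List String) :=
  (PySem.List.enumerate value.toList 0).foldl aStep [[], [], [], []]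

-- ===== PORT B =====
def create_matrix_from_ascii_alt (value : String) : List (List String) :=
  let cs := value.toList
  let heads := (PySem.List.pyRange 0 (cs.length : Int) 4).map
    (fun k => PySem.List.slice cs (some k) (some (k + 4)))
  (PySem.List.pyRange 0 4 1).map (fun j =>
    (heads.filter (fun h => j < (h.length : Int))).map
      (fun h => hexStr ((PySem.List.pyGetD h j ' ').toNat)))

-- ===== PRECONDITION & SPEC =====
def Spec_create_matrix_from_ascii (value : String) (out : List (List String)) : Prop := out = create_matrix_from_ascii_alt value
instance (value : String) (out : List (List String)) : Decidable (Spec_create_matrix_from_ascii value out) := by unfold Spec_create_matrix_from_ascii; infer_instance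

-- ===== CLAIM (what is proved, stated in full; the proofs are below) =====
def Claim_equal_create_matrix_from_ascii : Prop := ∀ (value : String), Dom_create_matrix_from_ascii value → Spec_create_matrix_from_ascii value (create_matrix_from_ascii value)

-- ===== LEMMAS AND PROOFS =====

-- proof-side: the hex strings of the chars of cs at positions i with (s + i) % 4 = j
def rowOfS : List Char → Nat → Nat → List String
  | [], _, _ => []
  | c :: cs, j, s => (if s % 4 = j then [hexStr c.toNat] else []) ++ rowOfS cs j (s + 1)

-- proof-side: the 4-character chunks of cs
def chunkList : List Char → List (List Char)
  | [] => []
  | c :: t => ((c :: t).take 4) :: chunkList ((c :: t).drop 4)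
termination_by cs => cs.length
decreasing_by simp

theorem rowOfS_add4 (j : Nat) : ∀ (cs : List Char) (s : Nat), rowOfS cs j (s + 4) = rowOfS cs j s := by
  intro cs
  induction cs with
  | nil => intro s; rfl
  | cons c cs ih =>
    intro s
    have h1 : (s + 4) % 4 = s % 4 := Nat.add_mod_right s 4
    have h2 : s + 4 + 1 = (s + 1) + 4 := by omega
    simp [rowOfS, h1, h2, ih (s + 1)]

theorem aStep_eq (c : Char) (s : Nat) (r0 r1 r2 r3 : List String) :
    aStep [r0, r1, r2, r3] ((s : Int), c) =
      [r0 ++ rowOfS [c] 0 s, r1 ++ rowOfS [c] 1 s, r2 ++ rowOfS [c] 2 s, r3 ++ rowOfS [c] 3 s] := by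
  have hidx : (if (s : Int) + 1 ≥ 4 then PySem.Int.mod (s : Int) 4 else (s : Int))
      = ((s % 4 : Nat) : Int) := by
    split_ifs with h
    · exact_mod_cast PySem.Int.mod_natCast s 4
    · have : s % 4 = s := Nat.mod_eq_of_lt (by omega)
      rw [this]
  simp only [aStep]
  rw [hidx]
  have h4 : s % 4 = 0 ∨ s % 4 = 1 ∨ s % 4 = 2 ∨ s % 4 = 3 := by omega
  rcases h4 with h | h | h | h <;>
    rw [h] <;>
    simp [rowOfS, h, PySem.List.pySetD, PySem.List.pySet?, PySem.List.pyGetD,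
      PySem.List.pyIdx?]

theorem aLoop_eq : ∀ (cs : List Char) (s : Nat) (r0 r1 r2 r3 : List String),
    (PySem.List.enumerate cs (s : Int)).foldl aStep [r0, r1, r2, r3] =
      [r0 ++ rowOfS cs 0 s, r1 ++ rowOfS cs 1 s, r2 ++ rowOfS cs 2 s, r3 ++ rowOfS cs 3 s] := by
  intro cs
  induction cs with
  | nil => intro s r0 r1 r2 r3; simp [PySem.List.enumerate_nil, rowOfS]
  | cons c cs ih =>
    intro s r0 r1 r2 r3
    rw [PySem.List.enumerate_cons]
    have hs1 : (s : Int) + 1 = ((s + 1 : Nat) : Int) := by push_cast; ring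
    simp only [List.foldl_cons, aStep_eq, hs1, ih (s + 1)]
    simp [rowOfS, List.append_assoc]

theorem slice_chunk (cs : List Char) (k : Nat) :
    PySem.List.slice cs (some (0 + 4 * (k : Int))) (some (0 + 4 * (k : Int) + 4)) = (cs.drop (4 * k)).take 4 := by
  rw [PySem.List.slice_toNat cs (a := 0 + 4 * (k : Int)) (b := 0 + 4 * (k : Int) + 4) (by positivity) (by positivity)]
  have h1 : (0 + 4 * (k : Int)).toNat = 4 * k := by omega
  have h2 : (0 + 4 * (k : Int) + 4).toNat = 4 * k + 4 := by omega
  rw [h1, h2]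
  congr 1
  omega

-- the strided chunk starts 0, 4, 8, … slice cs into chunkList cs
theorem heads_eq' : ∀ (q : Nat) (cs : List Char), q = (cs.length + 3) / 4 →
    List.map (fun k : Nat => PySem.List.slice cs (some (0 + 4 * (k : Int))) (some (0 + 4 * (k : Int) + 4))) (List.range q) = chunkList cs := by
  intro q
  induction q with
  | zero =>
    intro cs hq
    have : cs.length = 0 := by omega
    rw [List.eq_nil_of_length_eq_zero this, chunkList]
    rfl
  | succ q ih =>
    intro cs hq
    rcases cs with _ | ⟨c, t⟩
    · have h0 : ([] : List Char).length = 0 := rfl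
      omega
    · rw [List.range_succ_eq_map, List.map_cons, List.map_map, chunkList]
      congr 1
      · rw [slice_chunk]
        norm_num
      · rw [show ((c :: t).drop 4) = t.drop 3 from by simp]
        rw [← ih (t.drop 3) (by simp only [List.length_drop]; simp only [List.length_cons] at hq; omega)]
        apply List.map_congr_left
        intro k _
        simp only [Function.comp]
        rw [show ((k.succ : Nat) : Int) = ((k + 1 : Nat) : Int) from rfl]
        rw [slice_chunk, slice_chunk]
        rw [List.drop_drop]
        have hd : (c :: t).drop (4 * (k + 1)) = t.drop (4 * k + 3) := by
          rw [show 4 * (k + 1) = (4 * k + 3) + 1 from by omega]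
          exact List.drop_succ_cons
        rw [hd]
        congr 2
        omega


theorem row_eq : ∀ (cs : List Char) (j : Nat), j < 4 →
    ((chunkList cs).filter (fun h => (j : Int) < (h.length : Int))).map
      (fun h => hexStr ((PySem.List.pyGetD h (j : Int) ' ').toNat)) = rowOfS cs j 0 := by
  intro cs
  induction cs using chunkList.induct with
  | case1 => intro j hj; simp [chunkList, rowOfS]
  | case2 c t ih =>
    intro j hj
    rw [chunkList]
    rcases t with _ | ⟨b, t⟩
    · interval_cases j <;>
        simp [chunkList, rowOfS, PySem.List.pyGetD]
    rcases t with _ | ⟨d, t⟩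
    · interval_cases j <;>
        simp [chunkList, rowOfS, PySem.List.pyGetD]
    rcases t with _ | ⟨e, t⟩
    · interval_cases j <;>
        simp [chunkList, rowOfS, PySem.List.pyGetD]
    · have hih := ih j hj
      simp only [List.take, List.drop] at hih ⊢
      interval_cases j <;>
        simp [List.filter, PySem.List.pyGetD, rowOfS, rowOfS_add4] <;>
        simpa [PySem.List.pyGetD, PySem.List.pyIdx?] using hih

-- ===== VERDICT (by name: the statement is the Claim_ definition above) =====
theorem create_matrix_from_ascii_spec : Claim_equal_create_matrix_from_ascii := by
  intro value _
  unfold Spec_create_matrix_from_ascii create_matrix_from_ascii create_matrix_from_ascii_alt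
  have hA := aLoop_eq value.toList 0 [] [] [] []
  norm_num at hA
  rw [hA]
  simp only []
  rw [PySem.List.pyRange_of_pos 0 (value.toList.length : Int) (by omega)]
  rcases Nat.eq_zero_or_pos value.toList.length with hlen | hlen
  · rw [List.eq_nil_of_length_eq_zero hlen]
    rfl
  have hq : ((((value.toList.length : Int)) - 0 + 4 - 1) / 4).toNat = (value.toList.length + 3) / 4 := by
    omega
  rw [if_pos (by exact_mod_cast hlen : (0:Int) < (value.toList.length : Int)), hq]
  rw [show List.map (fun k => PySem.List.slice value.toList (some k) (some (k + 4)))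
        (List.map (fun k : Nat => (0:Int) + 4 * (k : Int)) (List.range ((value.toList.length + 3) / 4)))
      = (List.range ((value.toList.length + 3) / 4)).map
        (fun k : Nat => PySem.List.slice value.toList (some (0 + 4 * (k : Int))) (some (0 + 4 * (k : Int) + 4)))
    from by rw [List.map_map]; rfl]
  rw [heads_eq' _ value.toList rfl]
  have r0 := row_eq value.toList 0 (by omega)
  have r1 := row_eq value.toList 1 (by omega)
  have r2 := row_eq value.toList 2 (by omega)
  have r3 := row_eq value.toList 3 (by omega)
  simp only [Nat.cast_zero, Nat.cast_one, Nat.cast_ofNat] at r0 r1 r2 r3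
  rw [show PySem.List.pyRange 0 4 1 = [0, 1, 2, 3] from by decide]
  simp only [List.map_cons, List.map_nil]
  rw [r0, r1, r2, r3]
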